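-- pv_equiv track=rewrite | github.com/StefanVukovic99/leipzig-to-yomitan | main.py | filter_options_tree
-- ===== SOURCE A (Python) =====
-- def filter_options_tree(options_tree):
--     filtered_tree = {}
--
--     for lang, lang_options in options_tree.items():
--         filtered_tree[lang] = {}
--
--         for source, source_options in lang_options.items():
--             max_size = max(source_options.values())
--             newest_year = max(year for year, size in source_options.items() if size == max_size)
--
--             filtered_tree[lang][source] = {newest_year: max_size}
--
--     return filtered_tree
-- ===== SOURCE B (Python) =====
-- def filter_options_tree(options_tree):
--     result = {}
--     for lang, lang_options in options_tree.items():
--         filtered = {}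
--         for source, source_options in lang_options.items():
--             best = None  # (size, year)
--             for year, size in source_options.items():
--                 if best is None or size > best[0] or (size == best[0] and year > best[1]):
--                     best = (size, year)
--             filtered[source] = {} if best is None else {best[1]: best[0]}
--         result[lang] = filtered
--     return result
-- ===== Notes on version B (the rewrite author's own statement) =====
-- stated objective: simpler
-- what changed: Per source, the two passes (max of sizes, then max year among entries with that size) are replaced by one fold that keeps the lexicographic best (size, year) pair.
import Mathlib
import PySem

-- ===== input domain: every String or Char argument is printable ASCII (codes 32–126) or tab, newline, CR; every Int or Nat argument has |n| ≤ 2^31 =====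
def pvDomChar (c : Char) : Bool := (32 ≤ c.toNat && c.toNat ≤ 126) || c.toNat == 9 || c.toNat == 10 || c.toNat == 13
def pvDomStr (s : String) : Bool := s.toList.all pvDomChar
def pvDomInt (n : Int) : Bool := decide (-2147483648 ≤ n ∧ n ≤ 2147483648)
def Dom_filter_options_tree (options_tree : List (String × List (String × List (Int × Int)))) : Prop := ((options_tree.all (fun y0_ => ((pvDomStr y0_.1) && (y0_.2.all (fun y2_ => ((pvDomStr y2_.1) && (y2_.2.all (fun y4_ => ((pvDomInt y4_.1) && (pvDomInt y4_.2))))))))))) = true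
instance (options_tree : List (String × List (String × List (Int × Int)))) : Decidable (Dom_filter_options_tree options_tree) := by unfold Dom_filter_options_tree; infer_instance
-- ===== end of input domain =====

-- B replaces A's two max-scans per source by one fold keeping the lexicographic best (size, year) pair (objective: simpler).

-- ===== PORT A =====
-- literal port of A; '.getD 0' only covers the 'max() of empty' case, which Pre_ excludes (Python raises ValueError there)
def filter_options_tree (options_tree : List (String × List (String × List (Int × Int)))) : List (String × List (String × List (Int × Int))) :=
  options_tree.foldl (fun filtered_tree lp =>
    let inner := lp.2.foldl (fun acc sp =>
      let max_size := (PySem.List.max? (sp.2.map (fun p => p.2)) (fun v => v)).getD 0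
      let newest_year := (PySem.List.max? ((sp.2.filter (fun p => p.2 == max_size)).map (fun p => p.1)) (fun y => y)).getD 0
      acc ++ [(sp.1, [(newest_year, max_size)])]) []
    filtered_tree ++ [(lp.1, inner)]) []

-- ===== PORT B =====
-- one pass per source: best = None / (size, year); replace when strictly better lexicographically
def pvBStep (best : Option (Int × Int)) (p : Int × Int) : Option (Int × Int) :=
  match best with
  | none => some (p.2, p.1)
  | some b => if p.2 > b.1 || (p.2 == b.1 && p.1 > b.2) then some (p.2, p.1) else some b

def filter_options_tree_alt (options_tree : List (String × List (String × List (Int × Int)))) : List (String × List (String × List (Int × Int))) :=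
  options_tree.foldl (fun result lp =>
    let filtered := lp.2.foldl (fun acc sp =>
      let best := sp.2.foldl pvBStep none
      acc ++ [(sp.1, match best with | none => [] | some b => [(b.2, b.1)])]) []
    result ++ [(lp.1, filtered)]) []

-- ===== PRECONDITION & SPEC =====
-- Pre_ excludes trees with an empty inner source_options dict: A's max() raises ValueError there.
def Pre_filter_options_tree (options_tree : List (String × List (String × List (Int × Int)))) : Prop :=
  ∀ lp ∈ options_tree, ∀ sp ∈ lp.2, sp.2 ≠ []

instance (options_tree : List (String × List (String × List (Int × Int)))) : Decidable (Pre_filter_options_tree options_tree) := by unfold Pre_filter_options_tree; infer_instance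

def pvWitness_filter_options_tree : (List (String × List (String × List (Int × Int)))) :=
  [("en", [("wiki", [(2020, 5), (2021, 5)])])]

def Spec_filter_options_tree (options_tree : List (String × List (String × List (Int × Int)))) (out : List (String × List (String × List (Int × Int)))) : Prop := out = filter_options_tree_alt options_tree
instance (options_tree : List (String × List (String × List (Int × Int)))) (out : List (String × List (String × List (Int × Int)))) : Decidable (Spec_filter_options_tree options_tree out) := by unfold Spec_filter_options_tree; infer_instance

-- ===== CLAIM (what is proved, stated in full; the proofs are below) =====
def Claim_equal_filter_options_tree : Prop := ∀ (options_tree : List (String × List (String × List (Int × Int)))), Dom_filter_options_tree options_tree → Pre_filter_options_tree options_tree → Spec_filter_options_tree options_tree (filter_options_tree options_tree)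

-- ===== LEMMAS AND PROOFS =====

-- max(ys) for nonempty ys, as A's max? computes it
def pvMaxHead : List Int → Int
  | [] => 0
  | y :: t => t.foldl max y

-- the years of the entries of L whose size equals M (A's generator expression)
def pvFiltYears (L : List (Int × Int)) (M : Int) : List Int :=
  (L.filter (fun p => p.2 == M)).map (fun p => p.1)

theorem pvSeed_le_foldl (l : List (Int × Int)) (sz : Int) :
    sz ≤ l.foldl (fun a p => max a p.2) sz :=
  (PySem.List.le_foldl_max_int l (fun p => p.2) sz).1

theorem pvFoldl_attained (l : List (Int × Int)) (sz : Int) :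
    l.foldl (fun a p => max a p.2) sz = sz ∨
      ∃ p ∈ l, p.2 = l.foldl (fun a p => max a p.2) sz := by
  have h : l.foldl (fun a p => max a p.2) sz = (l.map (fun p => p.2)).foldl max sz := by
    rw [List.foldl_map]
  rcases PySem.List.foldl_max_mem (l.map (fun p => p.2)) sz with h1 | h1
  · left; omega
  · right
    rcases List.mem_map.mp h1 with ⟨p, hp, hps⟩
    exact ⟨p, hp, by omega⟩

-- core invariant of B's fold: the running best is (max size so far, max year among entries attaining it),
-- with the seed counted as a virtual entry
theorem pvCore (l : List (Int × Int)) (sz yr : Int) :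
    l.foldl pvBStep (some (sz, yr)) =
      some (l.foldl (fun a p => max a p.2) sz,
            pvMaxHead (pvFiltYears ((yr, sz) :: l) (l.foldl (fun a p => max a p.2) sz))) := by
  induction l generalizing sz yr with
  | nil => simp [pvMaxHead, pvFiltYears]
  | cons p l ih =>
    simp only [List.foldl_cons]
    by_cases h1 : p.2 > sz
    · have hstep : pvBStep (some (sz, yr)) p = some (p.2, p.1) := by
        simp [pvBStep, h1]
      rw [hstep, ih]
      have hmax : max sz p.2 = p.2 := by omega
      rw [hmax]
      -- the old seed (yr, sz) cannot attain the final max since sz < p.2 ≤ M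
      have hle : p.2 ≤ l.foldl (fun a p => max a p.2) p.2 := pvSeed_le_foldl l p.2
      have hfilt : pvFiltYears ((yr, sz) :: p :: l) (l.foldl (fun a p => max a p.2) p.2) =
          pvFiltYears ((p.1, p.2) :: l) (l.foldl (fun a p => max a p.2) p.2) := by
        simp only [pvFiltYears, List.filter_cons]
        have : ((yr, sz).2 == l.foldl (fun a p => max a p.2) p.2) = false := by
          simp only [beq_eq_false_iff_ne]; show sz ≠ _; omega
        rw [this]
        simp
      rw [hfilt]
    · by_cases h2 : p.2 == sz && p.1 > yr
      · have hpe : p.2 = sz := by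
          have := (Bool.and_eq_true _ _).mp h2 |>.1; exact beq_iff_eq.mp this
        have hyr : yr < p.1 := by
          have := (Bool.and_eq_true _ _).mp h2 |>.2; simpa using this
        have hstep : pvBStep (some (sz, yr)) p = some (p.2, p.1) := by
          simp [pvBStep, h2]
        rw [hstep, ih]
        rw [hpe]
        have hmax : max sz sz = sz := by omega
        rw [hmax]
        set M := l.foldl (fun a p => max a p.2) sz with hMdef
        have hszM : sz ≤ M := pvSeed_le_foldl l sz
        by_cases hAtt : sz = M
        · have hfa : pvFiltYears ((yr, sz) :: p :: l) M = yr :: p.1 :: pvFiltYears l M := by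
            simp only [pvFiltYears, List.filter_cons]
            have e1 : ((yr, sz).2 == M) = true := by simp [← hAtt]
            have e2 : (p.2 == M) = true := by simp [hpe, ← hAtt]
            rw [e1, e2]; simp
          have hfb : pvFiltYears ((p.1, sz) :: l) M = p.1 :: pvFiltYears l M := by
            simp only [pvFiltYears, List.filter_cons]
            have e1 : (((p.1, sz) : Int × Int).2 == M) = true := by simp [← hAtt]
            rw [e1]; simp
          rw [hfa, hfb]
          simp only [pvMaxHead, List.foldl_cons]
          have : max yr p.1 = p.1 := by omega
          rw [this]
        · have hne : (sz == M) = false := by simp [hAtt]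
          have hfa : pvFiltYears ((yr, sz) :: p :: l) M = pvFiltYears (p :: l) M := by
            simp only [pvFiltYears, List.filter_cons]
            rw [show (((yr, sz) : Int × Int).2 == M) = false from hne]
            simp
          have hfb : pvFiltYears ((p.1, sz) :: l) M = pvFiltYears l M := by
            simp only [pvFiltYears, List.filter_cons]
            rw [show (((p.1, sz) : Int × Int).2 == M) = false from hne]
            simp
          have hfc : pvFiltYears (p :: l) M = pvFiltYears l M := by
            simp only [pvFiltYears, List.filter_cons]
            rw [show ((p.2 : Int) == M) = false by rw [hpe]; exact hne]
            simp
          rw [hfa, hfb, hfc]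
      · -- p does not improve the best
        have hstep : pvBStep (some (sz, yr)) p = some (sz, yr) := by
          simp only [pvBStep]
          have : (p.2 > sz || (p.2 == sz && p.1 > yr)) = false := by
            rw [Bool.or_eq_false_iff]
            constructor
            · simp; omega
            · exact Bool.not_eq_true _ ▸ (by simpa using h2)
          simp [this]
        rw [hstep, ih]
        have hple : p.2 ≤ sz := by omega
        have hmax : max sz p.2 = sz := by omega
        rw [hmax]
        set M := l.foldl (fun a p => max a p.2) sz with hMdef
        have hszM : sz ≤ M := pvSeed_le_foldl l sz
        by_cases hpe : p.2 = sz
        · have hyle : p.1 ≤ yr := by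
            by_contra hc
            exact h2 (by simp [hpe]; omega)
          by_cases hAtt : sz = M
          · have hfa : pvFiltYears ((yr, sz) :: p :: l) M = yr :: p.1 :: pvFiltYears l M := by
              simp only [pvFiltYears, List.filter_cons]
              have e1 : ((yr, sz).2 == M) = true := by simp [← hAtt]
              have e2 : (p.2 == M) = true := by simp [hpe, ← hAtt]
              rw [e1, e2]; simp
            have hfb : pvFiltYears ((yr, sz) :: l) M = yr :: pvFiltYears l M := by
              simp only [pvFiltYears, List.filter_cons]
              have e1 : ((yr, sz).2 == M) = true := by simp [← hAtt]
              rw [e1]; simp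
            rw [hfa, hfb]
            simp only [pvMaxHead, List.foldl_cons]
            have : max yr p.1 = yr := by omega
            rw [this]
          · have hne : (sz == M) = false := by simp [hAtt]
            have hfa : pvFiltYears ((yr, sz) :: p :: l) M = pvFiltYears ((yr, sz) :: l) M := by
              simp only [pvFiltYears, List.filter_cons]
              rw [show ((p.2 : Int) == M) = false by rw [hpe]; exact hne]
              simp
            rw [hfa]
        · have hplt : p.2 < sz := by omega
          have hfa : pvFiltYears ((yr, sz) :: p :: l) M = pvFiltYears ((yr, sz) :: l) M := by
            simp only [pvFiltYears, List.filter_cons]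
            have hz : ((p.2 : Int) == M) = false := by
              simp only [beq_eq_false_iff_ne]; omega
            rw [hz]
            simp
          rw [hfa]

theorem pvMaxHead_eq_max? (ys : List Int) (h : ys ≠ []) :
    (PySem.List.max? ys (fun y => y)).getD 0 = pvMaxHead ys := by
  cases ys with
  | nil => exact absurd rfl h
  | cons y t => rw [PySem.List.max?_id_cons]; rfl

-- per-source agreement: B's single fold returns exactly A's (newest_year, max_size)
theorem pvSource (so : List (Int × Int)) (h : so ≠ []) :
    so.foldl pvBStep none =
      some ((PySem.List.max? (so.map (fun p => p.2)) (fun v => v)).getD 0,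
            (PySem.List.max? ((so.filter (fun p => p.2 ==
                (PySem.List.max? (so.map (fun p => p.2)) (fun v => v)).getD 0)).map (fun p => p.1))
              (fun y => y)).getD 0) := by
  cases so with
  | nil => exact absurd rfl h
  | cons x l =>
    have hms : (PySem.List.max? ((x :: l).map (fun p => p.2)) (fun v => v)).getD 0 =
        l.foldl (fun a p => max a p.2) x.2 := by
      rw [List.map_cons, PySem.List.max?_id_cons, Option.getD_some, List.foldl_map]
    set M := l.foldl (fun a p => max a p.2) x.2 with hMdef
    have hstep0 : (x :: l).foldl pvBStep none = l.foldl pvBStep (some (x.2, x.1)) := rfl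
    rw [hstep0, pvCore]
    have hseed : ((x.1, x.2) : Int × Int) = x := rfl
    rw [← hMdef, hms]
    -- the filtered year list is nonempty: the max is attained
    have hne : pvFiltYears (x :: l) M ≠ [] := by
      have hx2 : x.2 ≤ M := pvSeed_le_foldl l x.2
      rcases pvFoldl_attained l x.2 with hc | ⟨p, hp, hps⟩
      · have : (x.2 == M) = true := by simp [hMdef ▸ hc]
        simp only [pvFiltYears, List.filter_cons, this]
        simp
      · simp only [pvFiltYears, ne_eq, List.map_eq_nil_iff, List.filter_eq_nil_iff]
        intro hall
        exact absurd (beq_iff_eq.mpr hps) (by simpa using hall p (List.mem_cons_of_mem x hp))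
    rw [hseed]
    rw [← pvMaxHead_eq_max? _ hne]
    rfl

-- ===== VERDICT (by name: the statement is the Claim_ definition above) =====
theorem filter_options_tree_spec : Claim_equal_filter_options_tree := by
  intro t hdom hpre
  unfold Spec_filter_options_tree filter_options_tree filter_options_tree_alt
  rw [PySem.List.foldl_append_singleton_eq_map, PySem.List.foldl_append_singleton_eq_map]
  simp only [List.nil_append]
  apply List.map_congr_left
  intro lp hlp
  simp only [Prod.mk.injEq, true_and]
  rw [PySem.List.foldl_append_singleton_eq_map, PySem.List.foldl_append_singleton_eq_map]
  simp only [List.nil_append]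
  apply List.map_congr_left
  intro sp hsp
  have hne : sp.2 ≠ [] := hpre lp hlp sp hsp
  rw [pvSource sp.2 hne]
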